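-- pv_equiv track=rewrite | github.com/sprinteroz/Linux-NTFS-Manager | ntfs-complete-manager-gui/main.py | validate_filesystem_label
-- ===== SOURCE A (Python) =====
-- def validate_filesystem_label(label: str, fstype: str) -> tuple[bool, str]:
--     """Validate filesystem label according to filesystem rules
--
--     Returns: (is_valid, error_message)
--     """
--     if not label:
--         return True, ""  # Empty label is valid
--
--     # Common restrictions
--     if len(label) > 255:
--         return False, "Label too long (max 255 characters)"
--
--     # Filesystem-specific rules
--     if fstype == 'ntfs':
--         # NTFS allows most characters but has length limit of 32
--         if len(label) > 32:
--             return False, "NTFS label too long (max 32 characters)"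
--         # No path separators
--         if '/' in label or '\\' in label:
--             return False, "NTFS label cannot contain / or \\"
--     elif fstype == 'fat32':
--         # FAT32 is more restrictive
--         if len(label) > 11:
--             return False, "FAT32 label too long (max 11 characters)"
--         # No special characters
--         invalid_chars = ['/', '\\', '*', '?', '"', '<', '>', '|', '+', ',', ';', '=', '[', ']']
--         for char in invalid_chars:
--             if char in label:
--                 return False, f"FAT32 label cannot contain: {', '.join(invalid_chars)}"
--     elif fstype == 'ext4':
--         # EXT4 allows most characters
--         if len(label) > 16:
--             return False, "EXT4 label too long (max 16 characters)"
--
--     return True, ""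
-- ===== SOURCE B (Python) =====
-- # One pass over the label computes its length and two character flags; then a flat,
-- # priority-ordered list of (condition, message) checks is filtered and the first
-- # violated message (if any) is returned -- no per-fstype branch chain, no per-char rescans.
-- def validate_filesystem_label(label: str, fstype: str) -> tuple[bool, str]:
--     if not label:
--         return True, ""
--     n = 0
--     has_sep = False
--     has_fat_bad = False
--     for c in label:
--         n += 1
--         if c in '/\\':
--             has_sep = True
--             has_fat_bad = True
--         elif c in '*?"<>|+,;=[]':
--             has_fat_bad = True
--     checks = [
--         (n > 255, "Label too long (max 255 characters)"),
--         (fstype == 'ntfs' and n > 32, "NTFS label too long (max 32 characters)"),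
--         (fstype == 'ntfs' and has_sep, "NTFS label cannot contain / or \\"),
--         (fstype == 'fat32' and n > 11, "FAT32 label too long (max 11 characters)"),
--         (fstype == 'fat32' and has_fat_bad,
--          'FAT32 label cannot contain: /, \\, *, ?, ", <, >, |, +, ,, ;, =, [, ]'),
--         (fstype == 'ext4' and n > 16, "EXT4 label too long (max 16 characters)"),
--     ]
--     msgs = [msg for cond, msg in checks if cond]
--     if msgs:
--         return False, msgs[0]
--     return True, ""
-- ===== Notes on version B (the rewrite author's own statement) =====
-- stated objective: alternative
-- what changed: A dispatches per fstype in an if/elif chain with early returns and rescans the label once per forbidden character; B makes one pass over the label accumulating its length and two character flags, then filters a flat priority-ordered list of (condition, message) checks and returns the first violated message.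
import Mathlib
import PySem

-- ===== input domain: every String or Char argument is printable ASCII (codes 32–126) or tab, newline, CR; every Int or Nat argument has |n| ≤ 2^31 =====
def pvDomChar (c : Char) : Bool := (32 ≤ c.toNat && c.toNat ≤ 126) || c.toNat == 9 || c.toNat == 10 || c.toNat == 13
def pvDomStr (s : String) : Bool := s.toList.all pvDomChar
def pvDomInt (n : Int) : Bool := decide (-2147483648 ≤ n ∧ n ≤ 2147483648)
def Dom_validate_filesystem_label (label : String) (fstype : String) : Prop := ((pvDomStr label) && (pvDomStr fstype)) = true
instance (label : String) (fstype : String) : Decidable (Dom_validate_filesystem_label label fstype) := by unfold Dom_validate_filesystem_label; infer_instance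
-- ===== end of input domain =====

-- B replaces A's per-fstype early-return branch chain (which rescans the label per forbidden char)
-- by one pass over the label computing length + two character flags, then a flat priority-ordered
-- (condition, message) checks list filtered to its first violated entry (objective: alternative).


-- ===== PORT A =====
-- invalid_chars list of the fat32 branch
def pvInvalidChars : List Char := ['/', '\\', '*', '?', '"', '<', '>', '|', '+', ',', ';', '=', '[', ']']

-- Transliteration of A. `not label` = emptiness; `len(label)` = list length; a single-character
-- `c in label` substring test is exactly character membership (exact on all strings); the
-- early-return loop over invalid_chars is List.any over pvInvalidChars in the same order.
def validate_filesystem_label (label : String) (fstype : String) : Bool × String :=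
  let cs := label.toList
  if cs.isEmpty then (true, "")
  else if 255 < cs.length then (false, "Label too long (max 255 characters)")
  else if fstype == "ntfs" then
    if 32 < cs.length then (false, "NTFS label too long (max 32 characters)")
    else if cs.contains '/' || cs.contains '\\' then (false, "NTFS label cannot contain / or \\")
    else (true, "")
  else if fstype == "fat32" then
    if 11 < cs.length then (false, "FAT32 label too long (max 11 characters)")
    else if pvInvalidChars.any (fun ch => cs.contains ch) then
      (false, "FAT32 label cannot contain: /, \\, *, ?, \", <, >, |, +, ,, ;, =, [, ]")
    else (true, "")
  else if fstype == "ext4" then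
    if 16 < cs.length then (false, "EXT4 label too long (max 16 characters)")
    else (true, "")
  else (true, "")

-- ===== PORT B =====
-- B's single for-loop over the label accumulating (n, has_sep, has_fat_bad); the single-character
-- `c in '...'` substring tests are membership in the literal's characters (exact).
def pvScan (cs : List Char) : Nat × Bool × Bool :=
  cs.foldl (fun s c =>
    let n := s.1 + 1
    if "/\\".toList.contains c then (n, true, true)
    else if "*?\"<>|+,;=[]".toList.contains c then (n, s.2.1, true)
    else (n, s.2.1, s.2.2)) (0, false, false)

-- `return False, msgs[0]` when msgs is non-empty, else `True, ""`
def pvFirst (msgs : List String) : Bool × String :=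
  match msgs with
  | [] => (true, "")
  | m :: _ => (false, m)

-- B: the flat checks list and its filtered message comprehension.
def validate_filesystem_label_alt (label : String) (fstype : String) : Bool × String :=
  let cs := label.toList
  if cs.isEmpty then (true, "")
  else
    let st := pvScan cs
    let n := st.1
    let has_sep := st.2.1
    let has_fat_bad := st.2.2
    let checks : List (Bool × String) :=
      [(decide (255 < n), "Label too long (max 255 characters)"),
       ((fstype == "ntfs") && decide (32 < n), "NTFS label too long (max 32 characters)"),
       ((fstype == "ntfs") && has_sep, "NTFS label cannot contain / or \\"),
       ((fstype == "fat32") && decide (11 < n), "FAT32 label too long (max 11 characters)"),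
       ((fstype == "fat32") && has_fat_bad,
        "FAT32 label cannot contain: /, \\, *, ?, \", <, >, |, +, ,, ;, =, [, ]"),
       ((fstype == "ext4") && decide (16 < n), "EXT4 label too long (max 16 characters)")]
    pvFirst ((checks.filter (fun p => p.1)).map (fun p => p.2))

-- ===== PRECONDITION & SPEC =====
def Spec_validate_filesystem_label (label : String) (fstype : String) (out : Bool × String) : Prop := out = validate_filesystem_label_alt label fstype
instance (label : String) (fstype : String) (out : Bool × String) : Decidable (Spec_validate_filesystem_label label fstype out) := by unfold Spec_validate_filesystem_label; infer_instance

-- ===== CLAIM (what is proved, stated in full; the proofs are below) =====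
def Claim_equal_validate_filesystem_label : Prop := ∀ (label : String) (fstype : String), Dom_validate_filesystem_label label fstype → Spec_validate_filesystem_label label fstype (validate_filesystem_label label fstype)

-- ===== LEMMAS AND PROOFS =====
theorem pv_mem2 (c : Char) : "/\\".toList.contains c = ((c == '/') || (c == '\\')) := by
  rw [show "/\\".toList = ['/', '\\'] from by decide]
  by_cases h1 : c = '/'
  · subst h1; decide
  · by_cases h2 : c = '\\'
    · subst h2; decide
    · simp [List.contains_eq_mem, h1, h2]

theorem pv_sep_iff (cs : List Char) :
    cs.any (fun c => "/\\".toList.contains c) = (cs.contains '/' || cs.contains '\\') := by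
  induction cs with
  | nil => decide
  | cons c cs ih =>
    rw [List.any_cons, ih, List.contains_cons, List.contains_cons, pv_mem2,
        show (('/':Char) == c) = (c == '/') from Bool.beq_comm,
        show (('\\':Char) == c) = (c == '\\') from Bool.beq_comm]
    cases c == '/' <;> cases c == '\\' <;> cases cs.contains '/' <;> cases cs.contains '\\' <;> rfl

theorem pv_mem14 (c : Char) :
    ("/\\".toList.contains c || "*?\"<>|+,;=[]".toList.contains c) = pvInvalidChars.contains c := by
  rw [Bool.eq_iff_iff]
  simp only [Bool.or_eq_true, List.contains_eq_mem, decide_eq_true_eq, pvInvalidChars,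
    show "/\\".toList = ['/', '\\'] from by decide,
    show "*?\"<>|+,;=[]".toList = ['*','?','"','<','>','|','+',',',';','=','[',']'] from by decide,
    List.mem_cons, List.not_mem_nil, or_false]
  tauto

theorem pv_swap (l cs : List Char) : cs.any (fun c => l.contains c) = l.any (fun ch => cs.contains ch) := by
  rw [Bool.eq_iff_iff]
  simp only [List.any_eq_true, List.contains_eq_mem, decide_eq_true_eq]
  exact ⟨fun ⟨c, h1, h2⟩ => ⟨c, h2, h1⟩, fun ⟨c, h1, h2⟩ => ⟨c, h2, h1⟩⟩

theorem pv_fat_iff (cs : List Char) :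
    cs.any (fun c => "/\\".toList.contains c || "*?\"<>|+,;=[]".toList.contains c)
      = pvInvalidChars.any (fun ch => cs.contains ch) := by
  simp only [pv_mem14]
  exact pv_swap pvInvalidChars cs

theorem pvScan_spec (cs : List Char) :
    pvScan cs = (cs.length,
      cs.any (fun c => "/\\".toList.contains c),
      cs.any (fun c => "/\\".toList.contains c || "*?\"<>|+,;=[]".toList.contains c)) := by
  suffices h : ∀ (s : Nat × Bool × Bool),
      cs.foldl (fun s c =>
        let n := s.1 + 1
        if "/\\".toList.contains c then (n, true, true)
        else if "*?\"<>|+,;=[]".toList.contains c then (n, s.2.1, true)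
        else (n, s.2.1, s.2.2)) s
      = (s.1 + cs.length,
         s.2.1 || cs.any (fun c => "/\\".toList.contains c),
         s.2.2 || cs.any (fun c => "/\\".toList.contains c || "*?\"<>|+,;=[]".toList.contains c)) by
    simpa [pvScan] using h (0, false, false)
  induction cs with
  | nil => intro s; simp
  | cons c cs ih =>
    intro s
    rw [List.foldl_cons, List.any_cons, List.any_cons, List.length_cons]
    by_cases h1 : "/\\".toList.contains c = true
    · rw [if_pos h1, ih, h1]
      simp only [Bool.true_or, Bool.or_true]
      rw [show s.1 + 1 + cs.length = s.1 + (cs.length + 1) from by omega]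
    · have e1 : "/\\".toList.contains c = false := eq_false_of_ne_true h1
      rw [if_neg h1, e1]
      by_cases h2 : "*?\"<>|+,;=[]".toList.contains c = true
      · rw [if_pos h2, ih, h2]
        simp only [Bool.false_or, Bool.true_or, Bool.or_true]
        rw [show s.1 + 1 + cs.length = s.1 + (cs.length + 1) from by omega]
      · have e2 : "*?\"<>|+,;=[]".toList.contains c = false := eq_false_of_ne_true h2
        rw [if_neg h2, e2, ih]
        simp only [Bool.false_or]
        rw [show s.1 + 1 + cs.length = s.1 + (cs.length + 1) from by omega]

theorem pv_first (b0 b1 b2 b3 b4 b5 : Bool) (m0 m1 m2 m3 m4 m5 : String) :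
    pvFirst ((([((b0,m0) : Bool × String),(b1,m1),(b2,m2),(b3,m3),(b4,m4),(b5,m5)]).filter (fun p => p.1)).map (fun p => p.2)) =
    (if b0 then (false, m0) else if b1 then (false, m1) else if b2 then (false, m2)
     else if b3 then (false, m3) else if b4 then (false, m4) else if b5 then (false, m5)
     else (true, "")) := by
  cases b0 <;> cases b1 <;> cases b2 <;> cases b3 <;> cases b4 <;> cases b5 <;> rfl

-- ===== VERDICT (by name: the statement is the Claim_ definition above) =====
theorem validate_filesystem_label_spec : Claim_equal_validate_filesystem_label := by
  intro label fstype _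
  unfold Spec_validate_filesystem_label validate_filesystem_label validate_filesystem_label_alt
  simp only [pvScan_spec, pv_first, pv_sep_iff, pv_fat_iff]
  by_cases h1 : fstype = "ntfs"
  · subst h1; simp
  · by_cases h2 : fstype = "fat32"
    · subst h2; simp
    · by_cases h3 : fstype = "ext4"
      · subst h3; simp
      · have c1 : (fstype == "ntfs") = false := beq_eq_false_iff_ne.mpr h1
        have c2 : (fstype == "fat32") = false := beq_eq_false_iff_ne.mpr h2
        have c3 : (fstype == "ext4") = false := beq_eq_false_iff_ne.mpr h3
        simp [c1, c2, c3]
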